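-- pv_equiv track=rewrite | github.com/puli-101/RSA-based-broadcast-encryption | src/attack.py | filter_batches
-- ===== SOURCE A (Python) =====
-- def filter_batches(liste_1, liste_2, lam):
--     """
--         Fonction pour supprimer les valeurs dupliquees
--         et les nombres premiers de bitsize differente a lambda
--     """
--     l = []
--     for x in liste_1:
--         if x >= 2**(lam-1):
--             l += [x]
--     for i in range(0, len(liste_2)):
--         x = liste_2[i]
--         if x >= 2 ** (lam - 1) and (not (x in liste_1) or liste_1.count(x) < liste_2[i:].count(x)):
--             l += [x]
--     return l
-- ===== SOURCE B (Python) =====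
-- def filter_batches(liste_1, liste_2, lam):
--     t = 2 ** (lam - 1)
--     counts_1 = {}
--     for x in liste_1:
--         counts_1[x] = counts_1.get(x, 0) + 1
--     out = [x for x in liste_1 if x >= t]
--     tail = []
--     suffix = {}
--     for x in reversed(liste_2):
--         suffix[x] = suffix.get(x, 0) + 1
--         if x >= t and counts_1.get(x, 0) < suffix[x]:
--             tail.append(x)
--     tail.reverse()
--     return out + tail
-- ===== Notes on version B (the rewrite author's own statement) =====
-- stated objective: faster
-- what changed: Replaced the per-index inner scans (list membership, liste_1.count and a suffix-slice count for every element of liste_2) by a counter of liste_1 built once plus a single reverse pass over liste_2 that maintains a running suffix counter.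
import Mathlib
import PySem

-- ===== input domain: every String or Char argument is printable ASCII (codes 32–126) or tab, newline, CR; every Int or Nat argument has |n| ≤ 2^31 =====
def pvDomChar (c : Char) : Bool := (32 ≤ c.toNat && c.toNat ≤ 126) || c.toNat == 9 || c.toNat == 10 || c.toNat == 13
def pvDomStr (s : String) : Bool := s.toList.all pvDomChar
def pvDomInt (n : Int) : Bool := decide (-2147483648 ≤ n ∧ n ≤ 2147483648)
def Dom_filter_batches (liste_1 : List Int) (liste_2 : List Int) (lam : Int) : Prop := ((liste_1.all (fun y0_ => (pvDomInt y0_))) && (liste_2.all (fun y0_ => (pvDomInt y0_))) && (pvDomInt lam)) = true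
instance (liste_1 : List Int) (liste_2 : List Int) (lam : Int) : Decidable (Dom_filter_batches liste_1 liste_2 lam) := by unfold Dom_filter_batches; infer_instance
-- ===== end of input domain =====

-- B replaces A's quadratic inner scans (list membership, liste_1.count, suffix .count per index)
-- by a precomputed counter of liste_1 and one reverse pass over liste_2 maintaining a suffix
-- counter: O(n^2) → O(n); return value proved identical (no argument is mutated by either).

-- Exact model of Python's 'x >= 2 ** (lam - 1)' on an int x (shared by both ports, since both
-- Pythons write literally this test): for lam ≥ 1 an integer power; for lam ≤ 0 Python computes
-- the float 2.0**(lam-1), which is a positive number ≤ 0.5 while lam-1 ≥ -1074 (so the test is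
-- x ≥ 1 on ints) and underflows to exactly 0.0 for lam-1 ≤ -1075 (so the test is x ≥ 0).
def pyGeHalfPow (x : Int) (lam : Int) : Bool :=
  if 1 ≤ lam then decide ((2 : Int) ^ (lam - 1).toNat ≤ x)
  else if -1073 ≤ lam then decide (1 ≤ x)
  else decide (0 ≤ x)

-- ===== PORT A =====
def filter_batches (liste_1 : List Int) (liste_2 : List Int) (lam : Int) : List Int :=
  -- l = []; for x in liste_1: if x >= 2**(lam-1): l += [x]
  let l := liste_1.foldl (fun l x => if pyGeHalfPow x lam then l ++ [x] else l) []
  -- for i in range(0, len(liste_2)): x = liste_2[i]; if …: l += [x]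
  (PySem.List.pyRange 0 (PySem.List.len liste_2) 1).foldl (fun l i =>
    match PySem.List.pyGet? liste_2 i with
    | none => l   -- unreachable: i ∈ range(len(liste_2))
    | some x =>
      if pyGeHalfPow x lam &&
          (!(liste_1.contains x) ||
           decide (PySem.List.count liste_1 x <
                   PySem.List.count (PySem.List.slice liste_2 (some i) none) x)) then
        l ++ [x]
      else l) l

-- ===== PORT B =====
def filter_batches_alt (liste_1 : List Int) (liste_2 : List Int) (lam : Int) : List Int :=
  -- counts_1 = {}; for x in liste_1: counts_1[x] = counts_1.get(x,0)+1
  let counts_1 := liste_1.foldl (fun d x => d.insert x (d.getD x 0 + 1))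
                    (PySem.Dict.empty : PySem.Dict Int Int)
  -- out = [x for x in liste_1 if x >= t]
  let out := liste_1.filter (fun x => pyGeHalfPow x lam)
  -- tail = []; suffix = {}; for x in reversed(liste_2): …
  let st := liste_2.reverse.foldl
    (fun (st : PySem.Dict Int Int × List Int) x =>
      let suffix := st.1.insert x (st.1.getD x 0 + 1)
      (suffix,
       if pyGeHalfPow x lam && decide (counts_1.getD x 0 < suffix.getD x 0) then
         st.2 ++ [x]
       else st.2))
    ((PySem.Dict.empty : PySem.Dict Int Int), ([] : List Int))
  -- tail.reverse(); return out + tail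
  out ++ st.2.reverse

-- ===== PRECONDITION & SPEC =====
def Spec_filter_batches (liste_1 : List Int) (liste_2 : List Int) (lam : Int) (out : List Int) : Prop := out = filter_batches_alt liste_1 liste_2 lam
instance (liste_1 : List Int) (liste_2 : List Int) (lam : Int) (out : List Int) : Decidable (Spec_filter_batches liste_1 liste_2 lam out) := by unfold Spec_filter_batches; infer_instance

-- ===== CLAIM (what is proved, stated in full; the proofs are below) =====
def Claim_equal_filter_batches : Prop := ∀ (liste_1 : List Int) (liste_2 : List Int) (lam : Int), Dom_filter_batches liste_1 liste_2 lam → Spec_filter_batches liste_1 liste_2 lam (filter_batches liste_1 liste_2 lam)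

-- ===== LEMMAS AND PROOFS =====

-- The common skeleton of the second-loop output: the element at each position of l2 is kept
-- iff it passes the threshold and liste_1 holds fewer copies of it than the suffix of l2
-- starting at that position (A's 'not in or count <' condition collapses to this, since a
-- missing element has count 0 and every suffix count is at least 1).
def keptTail (l1 : List Int) (lam : Int) : List Int → List Int
  | [] => []
  | x :: rest =>
    (if pyGeHalfPow x lam && decide ((l1.count x : Int) < (rest.count x : Int) + 1) then [x]
     else []) ++ keptTail l1 lam rest

-- A's per-index condition equals keptTail's condition (n = count of x in the rest of the suffix).
lemma condA_eq (l1 : List Int) (lam x : Int) (n : Nat) :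
    (pyGeHalfPow x lam && (!(l1.contains x) || decide (l1.count x < n + 1)))
      = (pyGeHalfPow x lam && decide ((l1.count x : Int) < (n : Int) + 1)) := by
  by_cases h : x ∈ l1
  · have hc : l1.contains x = true := by simpa using h
    simp only [hc, Bool.not_true, Bool.false_or]
    congr 1
    simp only [decide_eq_decide]
    omega
  · have hc : l1.contains x = false := by simpa using h
    have h0 : l1.count x = 0 := List.count_eq_zero.mpr h
    simp [h0]

-- A's indexed second loop, re-indexed over List.range, computes keptTail.
lemma loopA_range (l1 : List Int) (lam : Int) : ∀ (l2 acc : List Int),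
    (List.range l2.length).foldl (fun l k =>
      match PySem.List.pyGet? l2 ((k : Nat) : Int) with
      | none => l
      | some x =>
        if pyGeHalfPow x lam && (!(l1.contains x) ||
            decide (PySem.List.count l1 x <
                    PySem.List.count (PySem.List.slice l2 (some ((k : Nat) : Int)) none) x)) then
          l ++ [x]
        else l) acc
      = acc ++ keptTail l1 lam l2 := by
  intro l2
  induction l2 with
  | nil => intro acc; simp [keptTail]
  | cons x rest ih =>
    intro acc
    rw [List.length_cons, List.range_succ_eq_map, List.foldl_cons, List.foldl_map]
    have hfun : (fun (l : List Int) (k : Nat) =>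
        match PySem.List.pyGet? (x :: rest) ((k.succ : Nat) : Int) with
        | none => l
        | some y =>
          if pyGeHalfPow y lam && (!(l1.contains y) ||
              decide (PySem.List.count l1 y <
                      PySem.List.count (PySem.List.slice (x :: rest) (some ((k.succ : Nat) : Int)) none) y)) then
            l ++ [y]
          else l)
        = (fun (l : List Int) (k : Nat) =>
        match PySem.List.pyGet? rest ((k : Nat) : Int) with
        | none => l
        | some y =>
          if pyGeHalfPow y lam && (!(l1.contains y) ||
              decide (PySem.List.count l1 y <
                      PySem.List.count (PySem.List.slice rest (some ((k : Nat) : Int)) none) y)) then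
            l ++ [y]
          else l) := by
      funext l k
      rw [PySem.List.slice_from_natCast, PySem.List.slice_from_natCast]
      simp [PySem.List.pyGet?_natCast]
    rw [hfun, ih]
    have h0 : PySem.List.pyGet? (x :: rest) ((0 : Nat) : Int) = some x := by
      simp
    rw [h0]
    have hsl : PySem.List.slice (x :: rest) (some ((0 : Nat) : Int)) none = x :: rest := by
      rw [PySem.List.slice_from_natCast]
      rfl
    rw [hsl]
    simp only [PySem.List.count_eq, List.count_cons_self]
    rw [condA_eq l1 lam x (rest.count x)]
    simp only [keptTail]
    split_ifs
    · simp
    · simp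

-- A's indexed second loop computes keptTail.
lemma loopA_eq (l1 : List Int) (lam : Int) : ∀ (l2 acc : List Int),
    (PySem.List.pyRange 0 (PySem.List.len l2) 1).foldl (fun l i =>
      match PySem.List.pyGet? l2 i with
      | none => l
      | some x =>
        if pyGeHalfPow x lam && (!(l1.contains x) ||
            decide (PySem.List.count l1 x <
                    PySem.List.count (PySem.List.slice l2 (some i) none) x)) then
          l ++ [x]
        else l) acc
      = acc ++ keptTail l1 lam l2 := by
  intro l2 acc
  rw [PySem.List.pyRange_one, List.foldl_map]
  have : ((PySem.List.len l2 - 0).toNat) = l2.length := by simp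
  rw [this]
  have hz : (fun (l : List Int) (k : Nat) =>
      match PySem.List.pyGet? l2 (0 + (k : Int)) with
      | none => l
      | some x =>
        if pyGeHalfPow x lam && (!(l1.contains x) ||
            decide (PySem.List.count l1 x <
                    PySem.List.count (PySem.List.slice l2 (some (0 + (k : Int))) none) x)) then
          l ++ [x]
        else l)
      = (fun (l : List Int) (k : Nat) =>
      match PySem.List.pyGet? l2 ((k : Nat) : Int) with
      | none => l
      | some x =>
        if pyGeHalfPow x lam && (!(l1.contains x) ||
            decide (PySem.List.count l1 x <
                    PySem.List.count (PySem.List.slice l2 (some ((k : Nat) : Int)) none) x)) then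
          l ++ [x]
        else l) := by
    funext l k
    norm_num
  rw [hz]
  exact loopA_range l1 lam l2 acc

-- The dict component of B's reverse loop is an independent counter fold.
lemma fst_loopB (lam : Int) (c : PySem.Dict Int Int) :
    ∀ (l : List Int) (st : PySem.Dict Int Int × List Int),
      (l.foldl (fun (st : PySem.Dict Int Int × List Int) x =>
        (st.1.insert x (st.1.getD x 0 + 1),
         if pyGeHalfPow x lam && decide (c.getD x 0 < st.1.getD x 0 + 1) then st.2 ++ [x]
         else st.2)) st).1
        = l.foldl (fun d x => d.insert x (d.getD x 0 + 1)) st.1 := by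
  intro l
  induction l with
  | nil => intro st; rfl
  | cons y t ih => intro st; simp only [List.foldl_cons]; exact ih _

-- B's reverse loop accumulates keptTail reversed.
lemma snd_loopB (l1 : List Int) (lam : Int) (c : PySem.Dict Int Int)
    (hc : ∀ y, c.getD y 0 = (l1.count y : Int)) :
    ∀ (s acc : List Int),
      (s.reverse.foldl (fun (st : PySem.Dict Int Int × List Int) x =>
        (st.1.insert x (st.1.getD x 0 + 1),
         if pyGeHalfPow x lam && decide (c.getD x 0 < st.1.getD x 0 + 1) then st.2 ++ [x]
         else st.2)) (PySem.Dict.empty, acc)).2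
        = acc ++ (keptTail l1 lam s).reverse := by
  intro s
  induction s with
  | nil => intro acc; simp [keptTail]
  | cons x t ih =>
    intro acc
    rw [List.reverse_cons, List.foldl_append, List.foldl_cons, List.foldl_nil]
    simp only []
    rw [ih acc, fst_loopB lam c t.reverse]
    rw [PySem.Dict.getD_foldl_insert_add_one]
    simp only [PySem.Dict.getD_empty, List.count_reverse, hc, keptTail, List.reverse_append,
      zero_add]
    split_ifs with h
    · simp
    · simp

-- ===== VERDICT (by name: the statement is the Claim_ definition above) =====
theorem filter_batches_spec : Claim_equal_filter_batches := by
  intro l1 l2 lam _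
  unfold Spec_filter_batches filter_batches filter_batches_alt
  simp only []
  rw [loopA_eq]
  have hc : ∀ y, (l1.foldl (fun d x => d.insert x (d.getD x 0 + 1))
      (PySem.Dict.empty : PySem.Dict Int Int)).getD y 0 = (l1.count y : Int) := by
    intro y
    rw [PySem.Dict.getD_foldl_insert_add_one]
    simp
  simp only [PySem.Dict.getD_insert_self]
  rw [snd_loopB l1 lam _ hc l2 []]
  simp only [PySem.List.foldl_append_if, List.nil_append, List.reverse_reverse]
  simp
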